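-- pv_equiv track=rewrite | github.com/KomacloS/Digitation_V3 | component_placer/component_placer.py | snake_circular
-- ===== SOURCE A (Python) =====
-- def snake_circular(cols: int, rows: int) -> list[tuple[int, int]]:
--     """
--     Build a “true circular” (IC‐style) snake order over a rows×cols grid.
--     If rows >= cols, we snake **down** each column, then up the next column, etc.
--     If cols  > rows, we snake **across** each row, then back across the next row, etc.
--
--     Returns a flat list of (row, col) indices in the desired visitation order.
--     """
--     order: list[tuple[int, int]] = []
--
--     if rows >= cols:
--         # Vertical‐major snake: go down column 0, up column 1, down column 2, …
--         for c in range(cols):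
--             if (c % 2) == 0:
--                 # even column: top → bottom
--                 for r in range(rows):
--                     order.append((r, c))
--             else:
--                 # odd column: bottom → top
--                 for r in reversed(range(rows)):
--                     order.append((r, c))
--     else:
--         # Horizontal‐major snake: go left → right on row 0, then right → left on row 1, …
--         for r in range(rows):
--             if (r % 2) == 0:
--                 # even row: left → right
--                 for c in range(cols):
--                     order.append((r, c))
--             else:
--                 # odd row: right → left
--                 for c in reversed(range(cols)):
--                     order.append((r, c))
--
--     return order
-- ===== SOURCE B (Python) =====
-- def snake_circular(cols: int, rows: int) -> list[tuple[int, int]]: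
--     """Snake (boustrophedon) visitation order over a rows x cols grid,
--     computed by one flat arithmetic loop instead of nested loops."""
--     if cols <= 0 or rows <= 0:
--         return []
--     vertical = rows >= cols
--     outer, inner = (cols, rows) if vertical else (rows, cols)
--     out: list[tuple[int, int]] = []
--     for i in range(outer * inner):
--         line, pos = divmod(i, inner)
--         off = pos if line % 2 == 0 else inner - 1 - pos
--         out.append((off, line) if vertical else (line, off))
--     return out
-- ===== Notes on version B (the rewrite author's own statement) =====
-- stated objective: alternative
-- what changed: Replaced the branchy nested loops (with reversed ranges for odd lines) by a single flat loop over outer*inner indices that derives line, position and snake offset by divmod arithmetic.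
import Mathlib
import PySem

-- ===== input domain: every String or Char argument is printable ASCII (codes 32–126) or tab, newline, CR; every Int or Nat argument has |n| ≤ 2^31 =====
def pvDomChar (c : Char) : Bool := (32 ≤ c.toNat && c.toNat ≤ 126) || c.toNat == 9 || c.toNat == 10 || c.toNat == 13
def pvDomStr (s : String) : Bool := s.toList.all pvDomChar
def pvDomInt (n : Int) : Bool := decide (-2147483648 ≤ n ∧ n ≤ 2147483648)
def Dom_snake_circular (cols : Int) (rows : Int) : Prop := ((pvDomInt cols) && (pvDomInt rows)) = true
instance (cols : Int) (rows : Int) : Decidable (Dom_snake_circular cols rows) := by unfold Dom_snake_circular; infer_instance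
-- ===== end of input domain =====

-- B replaces A's branchy nested loops by one flat arithmetic (divmod-driven) loop; objective: alternative decomposition, same cost.


-- ===== PORT A =====
def snake_circular (cols : Int) (rows : Int) : List (Int × Int) :=
  if rows ≥ cols then
    (PySem.List.pyRange 0 cols 1).foldl (fun order c =>
      if PySem.Int.mod c 2 == 0 then
        (PySem.List.pyRange 0 rows 1).foldl (fun order r => order ++ [(r, c)]) order
      else
        (PySem.List.pyRange 0 rows 1).reverse.foldl (fun order r => order ++ [(r, c)]) order) []
  else
    (PySem.List.pyRange 0 rows 1).foldl (fun order r =>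
      if PySem.Int.mod r 2 == 0 then
        (PySem.List.pyRange 0 cols 1).foldl (fun order c => order ++ [(r, c)]) order
      else
        (PySem.List.pyRange 0 cols 1).reverse.foldl (fun order c => order ++ [(r, c)]) order) []

-- ===== PORT B =====
def snake_circular_alt (cols : Int) (rows : Int) : List (Int × Int) :=
  if cols ≤ 0 ∨ rows ≤ 0 then []
  else
    let vertical : Bool := decide (rows ≥ cols)
    let outer : Int := if vertical then cols else rows
    let inner : Int := if vertical then rows else cols
    (PySem.List.pyRange 0 (outer * inner) 1).foldl (fun out i =>
      let line := PySem.Int.floordiv i inner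
      let pos := PySem.Int.mod i inner
      let off := if PySem.Int.mod line 2 == 0 then pos else inner - 1 - pos
      out ++ [if vertical then (off, line) else (line, off)]) []

-- ===== PRECONDITION & SPEC =====
def Spec_snake_circular (cols : Int) (rows : Int) (out : List (Int × Int)) : Prop := out = snake_circular_alt cols rows
instance (cols : Int) (rows : Int) (out : List (Int × Int)) : Decidable (Spec_snake_circular cols rows out) := by unfold Spec_snake_circular; infer_instance

-- ===== CLAIM (what is proved, stated in full; the proofs are below) =====
def Claim_equal_snake_circular : Prop := ∀ (cols : Int) (rows : Int), Dom_snake_circular cols rows → Spec_snake_circular cols rows (snake_circular cols rows)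

-- ===== LEMMAS AND PROOFS =====

-- per-index arithmetic of B, with the emitted pair abstracted
def snakeIdx (i : Nat) (emit : Int → Int → Int × Int) (k : Int) : Int × Int :=
  emit (PySem.Int.floordiv k ↑i)
       (if PySem.Int.mod (PySem.Int.floordiv k ↑i) 2 == 0
        then PySem.Int.mod k ↑i
        else ↑i - 1 - PySem.Int.mod k ↑i)

-- one line of A's nested loop, with the emitted pair abstracted
def snakeLine (i : Nat) (emit : Int → Int → Int × Int) (order : List (Int × Int)) (c : Int) : List (Int × Int) :=
  if PySem.Int.mod c 2 == 0 then
    (PySem.List.pyRange 0 ↑i 1).foldl (fun order r => order ++ [emit c r]) order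
  else
    (PySem.List.pyRange 0 ↑i 1).reverse.foldl (fun order r => order ++ [emit c r]) order

lemma snakeIdx_block (i : Nat) (hi : 0 < i) (emit : Int → Int → Int × Int) (o p : Nat) (hp : p < i) :
    snakeIdx i emit ↑(o * i + p)
      = emit ↑o (if PySem.Int.mod ↑o 2 == 0 then ↑p else (↑i : Int) - 1 - ↑p) := by
  have hdiv : (o * i + p) / i = o := by
    rw [Nat.mul_comm o i, Nat.mul_add_div hi, Nat.div_eq_of_lt hp, Nat.add_zero]
  have hmod : (o * i + p) % i = p := by
    rw [Nat.mul_comm o i, Nat.mul_add_mod, Nat.mod_eq_of_lt hp]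
  simp only [snakeIdx, PySem.Int.floordiv_natCast, PySem.Int.mod_natCast, hdiv, hmod]

lemma snakeLine_eq (i : Nat) (hi : 0 < i) (emit : Int → Int → Int × Int)
    (order : List (Int × Int)) (o : Nat) :
    snakeLine i emit order ↑o
      = order ++ (List.range i).map (fun (p : Nat) =>
          emit ↑o (if PySem.Int.mod ↑o 2 == 0 then (↑p : Int) else (↑i : Int) - 1 - ↑p)) := by
  unfold snakeLine
  rw [PySem.List.pyRange_zero_nat]
  by_cases h : (PySem.Int.mod (↑o) 2 == 0) = true
  · rw [if_pos h, PySem.List.foldl_append_singleton_eq_map, List.map_map]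
    congr 1
    apply List.map_congr_left
    intro p hp
    rw [if_pos h]
    rfl
  · rw [if_neg h, ← List.map_reverse, List.range_eq_range', List.reverse_range',
        ← List.range_eq_range', PySem.List.foldl_append_singleton_eq_map, List.map_map, List.map_map]
    congr 1
    apply List.map_congr_left
    intro p hp
    rw [List.mem_range] at hp
    rw [if_neg h]
    simp only [Function.comp]
    congr 1
    omega

lemma snake_core (i : Nat) (hi : 0 < i) (emit : Int → Int → Int × Int) (o : Nat) :
    (List.range (o * i)).map (fun (k : Nat) => snakeIdx i emit ↑k)
      = (PySem.List.pyRange 0 ↑o 1).foldl (snakeLine i emit) [] := by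
  induction o with
  | zero => simp [PySem.List.pyRange_zero_nat]
  | succ o ih =>
    have hcast : ((o : Int) + 1) = ((o + 1 : Nat) : Int) := by push_cast; ring
    have hsplit : PySem.List.pyRange 0 ↑(o + 1) 1
        = PySem.List.pyRange 0 ↑o 1 ++ [(↑o : Int)] := by
      rw [← hcast, PySem.List.pyRange_one_succ_right (by positivity)]
    rw [hsplit, List.foldl_append, ← ih, Nat.succ_mul, List.range_add, List.map_append,
      List.foldl_cons, List.foldl_nil, snakeLine_eq i hi emit _ o]
    congr 1
    rw [List.map_map]
    apply List.map_congr_left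
    intro p hp
    rw [List.mem_range] at hp
    simpa using snakeIdx_block i hi emit o p hp

-- A written through snakeLine
lemma snake_circular_eq (cols rows : Int) :
    snake_circular cols rows
      = if rows ≥ cols then
          (PySem.List.pyRange 0 cols 1).foldl (snakeLine rows.toNat (fun c r => (r, c))) []
        else
          (PySem.List.pyRange 0 rows 1).foldl (snakeLine cols.toNat (fun r c => (r, c))) [] := by
  unfold snake_circular snakeLine
  by_cases h : rows ≥ cols
  · by_cases h0 : 0 ≤ rows
    · rw [if_pos h, if_pos h, Int.toNat_of_nonneg h0]
    · rw [if_pos h, if_pos h]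
      have : rows.toNat = 0 := by omega
      rw [this]
      have h1 : PySem.List.pyRange 0 rows 1 = [] := PySem.List.pyRange_one_eq_nil (by omega)
      have h2 : PySem.List.pyRange 0 ((0:Nat):Int) 1 = [] := PySem.List.pyRange_one_eq_nil (by omega)
      rw [h1, h2]
  · by_cases h0 : 0 ≤ cols
    · rw [if_neg h, if_neg h, Int.toNat_of_nonneg h0]
    · rw [if_neg h, if_neg h]
      have : cols.toNat = 0 := by omega
      rw [this]
      have h1 : PySem.List.pyRange 0 cols 1 = [] := PySem.List.pyRange_one_eq_nil (by omega)
      have h2 : PySem.List.pyRange 0 ((0:Nat):Int) 1 = [] := PySem.List.pyRange_one_eq_nil (by omega)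
      rw [h1, h2]

-- B written through snakeIdx
lemma snake_circular_alt_eq (cols rows : Int) :
    snake_circular_alt cols rows
      = if cols ≤ 0 ∨ rows ≤ 0 then []
        else if rows ≥ cols then
          (PySem.List.pyRange 0 (cols * rows) 1).map (snakeIdx rows.toNat (fun c r => (r, c)))
        else
          (PySem.List.pyRange 0 (rows * cols) 1).map (snakeIdx cols.toNat (fun r c => (r, c))) := by
  unfold snake_circular_alt snakeIdx
  by_cases hz : cols ≤ 0 ∨ rows ≤ 0
  · rw [if_pos hz, if_pos hz]
  · rw [if_neg hz, if_neg hz]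
    push_neg at hz
    by_cases h : rows ≥ cols
    · simp only [ge_iff_le, h, decide_true, if_true, if_pos,
        PySem.List.foldl_append_singleton_eq_map, List.nil_append,
        Int.toNat_of_nonneg (by omega : (0:Int) ≤ rows)]
    · simp only [ge_iff_le, h, decide_false, Bool.false_eq_true, if_false, if_neg,
        PySem.List.foldl_append_singleton_eq_map, List.nil_append,
        Int.toNat_of_nonneg (by omega : (0:Int) ≤ cols)]

lemma a_nil_of_nonpos (cols rows : Int) (hz : cols ≤ 0 ∨ rows ≤ 0) :
    snake_circular cols rows = [] := by
  rw [snake_circular_eq]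
  by_cases h : rows ≥ cols
  · rw [if_pos h, PySem.List.pyRange_one_eq_nil (by omega), List.foldl_nil]
  · rw [if_neg h, PySem.List.pyRange_one_eq_nil (by omega), List.foldl_nil]

-- ===== VERDICT (by name: the statement is the Claim_ definition above) =====
theorem snake_circular_spec : Claim_equal_snake_circular := by
  intro cols rows _
  unfold Spec_snake_circular
  rw [snake_circular_eq, snake_circular_alt_eq]
  by_cases hz : cols ≤ 0 ∨ rows ≤ 0
  · rw [if_pos hz]
    have := a_nil_of_nonpos cols rows hz
    rw [snake_circular_eq] at this
    exact this
  · rw [if_neg hz]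
    push_neg at hz
    obtain ⟨hc, hr⟩ := hz
    obtain ⟨o, rfl⟩ := Int.eq_ofNat_of_zero_le (le_of_lt hc)
    obtain ⟨i, rfl⟩ := Int.eq_ofNat_of_zero_le (le_of_lt hr)
    by_cases h : (i : Int) ≥ (o : Int)
    · rw [if_pos h, if_pos h]
      have hmul : ((o : Int) * (i : Int)) = ((o * i : Nat) : Int) := by push_cast; ring
      have hi : 0 < i := by omega
      simp only [Int.toNat_natCast]
      rw [hmul]
      conv_rhs => rw [PySem.List.pyRange_zero_nat, List.map_map]
      exact (snake_core i hi (fun c r => (r, c)) o).symm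
    · rw [if_neg h, if_neg h]
      have hmul : ((i : Int) * (o : Int)) = ((i * o : Nat) : Int) := by push_cast; ring
      have ho : 0 < o := by omega
      simp only [Int.toNat_natCast]
      rw [hmul]
      conv_rhs => rw [PySem.List.pyRange_zero_nat, List.map_map]
      exact (snake_core o ho (fun r c => (r, c)) i).symm
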